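-- pv_equiv track=rewrite | github.com/hwcasus/LeetCodeSolution | onsite/835_image_overlap.py | f
-- ===== SOURCE A (Python) =====
-- from typing import List
--
-- def f(img1: List[List[int]], img2: List[List[int]]) -> int:
--     size = len(img1)
--     padded_size = 3 * size - 2
--     overlap_size = 2 * size - 1
--
--     padded_img2 = [[0 for _ in range(padded_size)] for _ in range(padded_size)]
--
--     offset = size - 1
--     for i in range(size):
--         for j in range(size):
--             padded_img2[i+offset][j+offset] = img2[i][j]
--
--     result = 0
--
--     for i_offset in range(overlap_size):
--         for j_offset in range(overlap_size):
--             s = sum([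
--                 padded_img2[i + i_offset][j + j_offset] * img1[i][j]
--                 for i in range(size)
--                 for j in range(size)
--             ])
--             result = max(result, s)
--
--     return result
-- ===== SOURCE B (Python) =====
-- def f(img1, img2):
--     n = len(img1)
--     cells1 = [(i, j, v) for i, row in enumerate(img1) for j, v in enumerate(row[:n]) if v]
--     cells2 = [(i, j, v) for i, row in enumerate(img2[:n]) for j, v in enumerate(row[:n]) if v]
--     acc = {}
--     for i1, j1, v1 in cells1:
--         for i2, j2, v2 in cells2:
--             k = (i2 - i1, j2 - j1)
--             acc[k] = acc.get(k, 0) + v1 * v2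
--     best = 0
--     for s in acc.values():
--         best = max(best, s)
--     return best
-- ===== Notes on version B (the rewrite author's own statement) =====
-- stated objective: alternative
-- what changed: Instead of padding img2 and re-summing an n*n window for each of the (2n-1)^2 translations, B makes one pass over the pairs of nonzero cells of img1 and img2, binning the products v1*v2 in a dict keyed by the offset vector (i2-i1, j2-j1), and returns the maximum bin value (at least 0); this is O(z1*z2) in the nonzero-cell counts, which helps on sparse images but was not measurably faster on the dense generated inputs.
import Mathlib
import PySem

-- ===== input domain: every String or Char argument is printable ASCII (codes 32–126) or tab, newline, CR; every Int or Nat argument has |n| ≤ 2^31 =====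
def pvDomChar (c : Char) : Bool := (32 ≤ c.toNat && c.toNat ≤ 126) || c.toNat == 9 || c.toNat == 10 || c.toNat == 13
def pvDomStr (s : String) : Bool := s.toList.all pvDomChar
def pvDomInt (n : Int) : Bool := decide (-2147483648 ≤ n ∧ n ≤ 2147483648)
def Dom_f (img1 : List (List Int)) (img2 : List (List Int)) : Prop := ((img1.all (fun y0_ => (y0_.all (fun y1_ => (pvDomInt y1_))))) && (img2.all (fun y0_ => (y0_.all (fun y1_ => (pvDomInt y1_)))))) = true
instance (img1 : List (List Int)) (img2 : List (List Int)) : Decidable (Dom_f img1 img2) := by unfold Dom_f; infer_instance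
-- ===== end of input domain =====

-- B replaces A's pad-and-rescan over all (2n-1)^2 translations by one pass over the pairs of
-- nonzero cells, binning products in a dict keyed by the offset vector (alternative algorithm).

-- ===== PORT A =====
def f (img1 : List (List Int)) (img2 : List (List Int)) : Int :=
  let size : Int := PySem.List.len img1
  let padded_size : Int := 3 * size - 2
  let overlap_size : Int := 2 * size - 1
  let padded0 : List (List Int) :=
    (PySem.List.pyRange 0 padded_size 1).map (fun _ =>
      (PySem.List.pyRange 0 padded_size 1).map (fun _ => (0 : Int)))
  let offset : Int := size - 1
  -- padded_img2[i+offset][j+offset] = img2[i][j]  (indices here are nonnegative and in range)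
  let padded : List (List Int) :=
    (PySem.List.pyRange 0 size 1).foldl (fun p i =>
      (PySem.List.pyRange 0 size 1).foldl (fun p j =>
        PySem.List.pySetD p (i + offset)
          (PySem.List.pySetD (PySem.List.pyGetD p (i + offset) []) (j + offset)
            (PySem.List.pyGetD (PySem.List.pyGetD img2 i []) j 0))) p) padded0
  (PySem.List.pyRange 0 overlap_size 1).foldl (fun result ioff =>
    (PySem.List.pyRange 0 overlap_size 1).foldl (fun result joff =>
      max result
        (((PySem.List.pyRange 0 size 1).flatMap (fun i =>
            (PySem.List.pyRange 0 size 1).map (fun j =>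
              PySem.List.pyGetD (PySem.List.pyGetD padded (i + ioff) []) (j + joff) 0 *
                PySem.List.pyGetD (PySem.List.pyGetD img1 i []) j 0))).foldl (· + ·) 0)) result) 0

-- ===== PORT B =====
def f_alt (img1 : List (List Int)) (img2 : List (List Int)) : Int :=
  let n : Int := PySem.List.len img1
  let cells1 : List (Int × Int × Int) :=
    (PySem.List.enumerate img1 0).flatMap (fun ir =>
      ((PySem.List.enumerate (PySem.List.slice ir.2 none (some n)) 0).filter
          (fun jv => jv.2 != 0)).map (fun jv => (ir.1, jv.1, jv.2)))
  let cells2 : List (Int × Int × Int) :=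
    (PySem.List.enumerate (PySem.List.slice img2 none (some n)) 0).flatMap (fun ir =>
      ((PySem.List.enumerate (PySem.List.slice ir.2 none (some n)) 0).filter
          (fun jv => jv.2 != 0)).map (fun jv => (ir.1, jv.1, jv.2)))
  let acc : PySem.Dict (Int × Int) Int :=
    cells1.foldl (fun acc c1 =>
      cells2.foldl (fun acc c2 =>
        PySem.Dict.insert acc (c2.1 - c1.1, c2.2.1 - c1.2.1)
          (PySem.Dict.getD acc (c2.1 - c1.1, c2.2.1 - c1.2.1) 0 + c1.2.2 * c2.2.2)) acc)
      PySem.Dict.empty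
  acc.values.foldl (fun best s => max best s) 0

-- ===== PRECONDITION & SPEC =====
-- Pre_f is exactly where the Python A returns: A reads img1[i][j] and img2[i][j] for all
-- i, j < len(img1) and raises IndexError iff some such entry is missing.
def Pre_f (img1 : List (List Int)) (img2 : List (List Int)) : Prop :=
  (∀ r ∈ img1, img1.length ≤ r.length) ∧ img1.length ≤ img2.length ∧
    ∀ r ∈ img2.take img1.length, img1.length ≤ r.length
instance (img1 : List (List Int)) (img2 : List (List Int)) : Decidable (Pre_f img1 img2) := by
  unfold Pre_f; infer_instance
def pvWitness_f : List (List Int) × List (List Int) := ([[1]], [[1]])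
def Spec_f (img1 : List (List Int)) (img2 : List (List Int)) (out : Int) : Prop := out = f_alt img1 img2
instance (img1 : List (List Int)) (img2 : List (List Int)) (out : Int) : Decidable (Spec_f img1 img2 out) := by unfold Spec_f; infer_instance

-- ===== CLAIM (what is proved, stated in full; the proofs are below) =====
def Claim_equal_f : Prop := ∀ (img1 : List (List Int)) (img2 : List (List Int)), Dom_f img1 img2 → Pre_f img1 img2 → Spec_f img1 img2 (f img1 img2)

-- ===== LEMMAS AND PROOFS =====

-- entry (i, j) of a matrix, 0 outside
def aV (M : List (List Int)) (i j : Nat) : Int := (M.getD i []).getD j 0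

-- img2 extended by zeros outside the n×n square, at Int coordinates
def v2e (img2 : List (List Int)) (n : Nat) (r c : Int) : Int :=
  if 0 ≤ r ∧ r < (n : Int) ∧ 0 ≤ c ∧ c < (n : Int) then aV img2 r.toNat c.toNat else 0

-- the cross-correlation at offset (di, dj)
def Sm (img1 img2 : List (List Int)) (n : Nat) (di dj : Int) : Int :=
  ((List.range n).map (fun (i : Nat) =>
    ((List.range n).map (fun (j : Nat) => v2e img2 n (↑i + di) (↑j + dj) * aV img1 i j)).sum)).sum

-- the list of nonzero cells (i, j, value) of the top-left n×n square
def cellsOf (M : List (List Int)) (n : Nat) : List (Int × Int × Int) :=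
  (List.range n).flatMap (fun (i : Nat) =>
    (((List.range n).filter (fun (j : Nat) => !(aV M i j == 0))).map
      (fun (j : Nat) => ((i : Int), (j : Int), aV M i j))))

def pairsOf (img1 img2 : List (List Int)) (n : Nat) : List ((Int × Int × Int) × (Int × Int × Int)) :=
  (cellsOf img1 n).flatMap (fun c1 => (cellsOf img2 n).map (fun c2 => (c1, c2)))

def keyOf (p : (Int × Int × Int) × (Int × Int × Int)) : Int × Int :=
  (p.2.1 - p.1.1, p.2.2.1 - p.1.2.1)

def wOf (p : (Int × Int × Int) × (Int × Int × Int)) : Int := p.1.2.2 * p.2.2.2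

-- ---- generic list lemmas ----

theorem pv_sum_flatMap {α : Type} (l : List α) (g : α → List Int) :
    (l.flatMap g).sum = (l.map (fun x => (g x).sum)).sum := by
  induction l with
  | nil => simp
  | cons a t ih => simp [ih]

theorem pv_sum_filter_zero {α : Type} (l : List α) (p : α → Bool) (g : α → Int)
    (h : ∀ x ∈ l, p x = false → g x = 0) :
    ((l.filter p).map g).sum = (l.map g).sum := by
  induction l with
  | nil => simp
  | cons a t ih =>
    have ht : ∀ x ∈ t, p x = false → g x = 0 := fun x hx => h x (List.mem_cons_of_mem _ hx)
    by_cases ha : p a = true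
    · simp [List.filter_cons, ha, ih ht]
    · have : g a = 0 := h a (List.mem_cons_self) (by simpa using ha)
      simp [List.filter_cons, ha, ih ht, this]

theorem pv_range_delta_filter (n : Nat) (x : Int) (q : Nat → Bool) :
    (List.range n).filter (fun j => q j && decide ((j : Int) = x)) =
      if 0 ≤ x ∧ x < (n : Int) ∧ q x.toNat = true then [x.toNat] else [] := by
  induction n with
  | zero => simp; omega
  | succ m ih =>
    rw [List.range_succ, List.filter_append, ih]
    by_cases hm : (m : Int) = x
    · have hx0 : 0 ≤ x := by omega
      have hxt : x.toNat = m := by omega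
      by_cases hq : q m = true
      · have : ¬ (0 ≤ x ∧ x < (m : Int) ∧ q x.toNat = true) := by omega
        simp [this, hm, hq, hxt]
        omega
      · have h1 : ¬ (0 ≤ x ∧ x < (m : Int) ∧ q x.toNat = true) := by
          rw [hxt]; simp [hq]
        have h2 : ¬ (0 ≤ x ∧ x < ((m : Int) + 1) ∧ q x.toNat = true) := by
          rw [hxt]; simp [hq]
        simp [h1, hm, hq]
        simp [h2, hxt, hq]
    · have heq : (0 ≤ x ∧ x < (m : Int) ∧ q x.toNat = true) ↔
          (0 ≤ x ∧ x < ((m : Int) + 1) ∧ q x.toNat = true) := by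
        constructor <;> (intro h; exact ⟨h.1, by omega, h.2.2⟩)
      rw [if_congr heq rfl rfl]
      simp [hm]

theorem pv_range_delta_sum (n : Nat) (x : Int) (g : Nat → Int) :
    ((List.range n).map (fun (i : Nat) => if (i : Int) = x then g i else 0)).sum =
      if 0 ≤ x ∧ x < (n : Int) then g x.toNat else 0 := by
  induction n with
  | zero =>
    have : ¬ (0 ≤ x ∧ x < ((0:Nat) : Int)) := by omega
    simp [this]
  | succ m ih =>
    rw [List.range_succ, List.map_append, List.sum_append, ih]
    by_cases hm : (m : Int) = x
    · have h1 : ¬ (0 ≤ x ∧ x < (m : Int)) := by omega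
      have h2 : (0 ≤ x ∧ x < ((m : Int) + 1)) := by omega
      have hxt : x.toNat = m := by omega
      simp only [if_neg h1]
      push_cast
      simp [h2, hm, hxt]
    · have heq : (0 ≤ x ∧ x < (m : Int)) ↔ (0 ≤ x ∧ x < ((m : Int) + 1)) := by
        constructor <;> (intro h; exact ⟨h.1, by omega⟩)
      rw [if_congr heq rfl rfl]
      simp [hm]

theorem pv_set_map_range {α : Type} (L k : Nat) (g : Nat → α) (v : α) (hk : k < L) :
    ((List.range L).map g).set k v = (List.range L).map (fun c => if c = k then v else g c) := by
  apply List.ext_getElem (by simp)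
  intro i h1 h2
  simp only [List.getElem_set, List.getElem_map, List.getElem_range]
  by_cases hik : k = i
  · simp [hik]
  · simp [hik, Ne.symm hik]

theorem pv_getD_weighted {κ β : Type} [BEq κ] [LawfulBEq κ] [DecidableEq κ]
    (l : List β) (key : β → κ) (w : β → Int) (d : PySem.Dict κ Int) (k : κ) :
    (l.foldl (fun d p => d.insert (key p) (d.getD (key p) 0 + w p)) d).getD k 0
      = d.getD k 0 + ((l.filter (fun p => decide (key p = k))).map w).sum := by
  induction l generalizing d with
  | nil => simp
  | cons p t ih =>
    rw [List.foldl_cons, ih, PySem.Dict.getD_insert, List.filter_cons]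
    by_cases h : key p = k
    · simp [h]; ring
    · simp only [h, decide_false, Bool.false_eq_true, if_false]
      have h2 : ¬ (k = key p) := fun hh => h (Eq.symm hh)
      simp [h2]


-- ---- A-side: the padded matrix ----

theorem pv_getD_set_self {α : Type} (l : List α) (i : Nat) (v d : α) (h : i < l.length) :
    (l.set i v).getD i d = v := by
  simp [List.getD_eq_getElem?_getD, List.getElem?_set, h]

theorem pv_innerfold (R : Nat) (p : List (List Int)) (hR : R < p.length)
    (v : Nat → Int) (m : Nat) (wi : Nat → Nat) :
    (List.range m).foldl (fun p j => p.set R ((p.getD R []).set (wi j) (v j))) p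
      = p.set R ((List.range m).foldl (fun row j => row.set (wi j) (v j)) (p.getD R [])) := by
  induction m with
  | zero =>
    rw [List.range_zero, List.foldl_nil, List.foldl_nil]
    rw [List.getD_eq_getElem _ _ hR, List.set_getElem_self]
  | succ t ih =>
    rw [List.range_succ, List.foldl_append, List.foldl_append, ih]
    simp only [List.foldl_cons, List.foldl_nil]
    rw [pv_getD_set_self _ _ _ _ hR, List.set_set]

theorem pv_rowfold (img2 : List (List Int)) (n i L : Nat) (hn : 0 < n) (hL : 2*n - 1 ≤ L)
    (g : Nat → Int) (m : Nat) (hm : m ≤ n) :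
    (List.range m).foldl (fun row (j : Nat) => row.set (j + (n-1)) (aV img2 i j))
        ((List.range L).map g)
      = (List.range L).map (fun c =>
          if n-1 ≤ c ∧ c < m + (n-1) then aV img2 i (c - (n-1)) else g c) := by
  induction m with
  | zero =>
    rw [List.range_zero, List.foldl_nil]
    apply List.map_congr_left
    intro c _
    have : ¬ (n-1 ≤ c ∧ c < 0 + (n-1)) := by omega
    rw [if_neg this]
  | succ t ih =>
    rw [List.range_succ, List.foldl_append, ih (by omega)]
    simp only [List.foldl_cons, List.foldl_nil]
    rw [pv_set_map_range _ _ _ _ (by omega)]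
    apply List.map_congr_left
    intro c _
    by_cases hc : c = t + (n-1)
    · rw [if_pos hc, if_pos (by omega)]
      have : c - (n-1) = t := by omega
      rw [this]
    · rw [if_neg hc]
      by_cases h2 : n-1 ≤ c ∧ c < t + (n-1)
      · rw [if_pos h2, if_pos (by omega)]
      · rw [if_neg h2, if_neg (by omega)]

theorem pv_padfold (img1 img2 : List (List Int)) (n L : Nat) (hn : 0 < n) (hL : 2*n - 1 ≤ L)
    (m : Nat) (hm : m ≤ n) (G : Nat → Nat → Int) :
    (List.range m).foldl (fun p (i : Nat) =>
        (List.range n).foldl (fun p (j : Nat) =>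
          p.set (i + (n-1)) ((p.getD (i + (n-1)) []).set (j + (n-1)) (aV img2 i j))) p)
        ((List.range L).map (fun r => (List.range L).map (G r)))
      = (List.range L).map (fun r => (List.range L).map (fun c =>
          if n-1 ≤ r ∧ r < m + (n-1) ∧ n-1 ≤ c ∧ c < 2*n-1 then
            aV img2 (r - (n-1)) (c - (n-1)) else G r c)) := by
  induction m generalizing G with
  | zero =>
    rw [List.range_zero, List.foldl_nil]
    apply List.map_congr_left
    intro r _
    apply List.map_congr_left
    intro c _
    have : ¬ (n-1 ≤ r ∧ r < 0 + (n-1) ∧ n-1 ≤ c ∧ c < 2*n-1) := by omega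
    rw [if_neg this]
  | succ t ih =>
    rw [List.range_succ, List.foldl_append, ih (by omega)]
    simp only [List.foldl_cons, List.foldl_nil]
    rw [pv_innerfold _ _ (by simp; omega) (fun j => aV img2 t j) n (fun j => j + (n-1))]
    rw [PySem.List.getD_map_range _ _ _ _ (by omega)]
    rw [pv_rowfold img2 n t L hn (by omega) _ n le_rfl]
    rw [pv_set_map_range _ _ _ _ (by omega)]
    apply List.map_congr_left
    intro r _
    by_cases hr : r = t + (n-1)
    · rw [if_pos hr]
      apply List.map_congr_left
      intro c _
      by_cases hc : n-1 ≤ c ∧ c < n + (n-1)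
      · rw [if_pos hc, if_pos (by omega)]
        have : r - (n-1) = t := by omega
        rw [this]
      · rw [if_neg hc, if_neg (by omega), if_neg (by omega), hr]
    · rw [if_neg hr]
      apply List.map_congr_left
      intro c _
      by_cases h2 : n-1 ≤ r ∧ r < t + (n-1) ∧ n-1 ≤ c ∧ c < 2*n-1
      · rw [if_pos h2, if_pos (by omega)]
      · rw [if_neg h2, if_neg (by omega)]

theorem pv_aV_def (M : List (List Int)) (i j : Nat) : (M.getD i []).getD j 0 = aV M i j := rfl

theorem pv_sumexpr (img1 img2 : List (List Int)) (n L : Nat) (hn : 0 < n) (hL : L = 3*n-2)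
    (io jo : Nat) (hio : io < 2*n-1) (hjo : jo < 2*n-1) :
    ((List.range n).flatMap (fun (i : Nat) =>
      (List.range n).map (fun (j : Nat) =>
        (((List.range L).map (fun r => (List.range L).map (fun c =>
              if n-1 ≤ r ∧ r < n + (n-1) ∧ n-1 ≤ c ∧ c < 2*n-1 then
                aV img2 (r - (n-1)) (c - (n-1)) else 0))).getD (i + io) []).getD (j + jo) 0 *
          aV img1 i j))).foldl (· + ·) 0
      = Sm img1 img2 n ((io : Int) - ((n : Int) - 1)) ((jo : Int) - ((n : Int) - 1)) := by
  rw [← List.sum_eq_foldl, pv_sum_flatMap]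
  unfold Sm
  apply congrArg
  apply List.map_congr_left
  intro i hi
  have hi' : i < n := List.mem_range.mp hi
  apply congrArg
  apply List.map_congr_left
  intro j hj
  have hj' : j < n := List.mem_range.mp hj
  rw [PySem.List.getD_map_range _ _ _ _ (show i + io < L by omega),
    PySem.List.getD_map_range _ _ _ _ (show j + jo < L by omega)]
  apply congrArg (· * aV img1 i j)
  unfold v2e
  split_ifs with hA hB
  · congr 1 <;> omega
  · exfalso; apply hB; constructor; omega; constructor; omega; constructor; omega; omega
  · exfalso; apply hA; constructor; omega; constructor; omega; constructor; omega; omega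
  · rfl

theorem pv_row_eq (n : Nat) (c : Int) (row : List Int) (hr : n ≤ row.length) :
    ((PySem.List.enumerate (PySem.List.slice row none (some (n : Int))) 0).filter
        (fun jv => jv.2 != 0)).map (fun jv => (c, jv.1, jv.2))
      = ((List.range n).filter (fun (j : Nat) => !(row.getD j 0 == 0))).map
          (fun (j : Nat) => (c, (j : Int), row.getD j 0)) := by
  rw [PySem.List.slice_to_natCast]
  rw [PySem.List.enumerate_eq_map_pyRange _ (0 : Int)]
  have hlen : (row.take n).length = n := by simp [hr]
  rw [PySem.List.len_eq, hlen, PySem.List.pyRange_zero_nat, List.map_map, List.filter_map,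
    List.map_map]
  have hget : ∀ j ∈ List.range n, PySem.List.pyGetD (row.take n) ((j : Nat) : Int) 0 = row.getD j 0 := by
    intro j hj
    rw [PySem.List.pyGetD_natCast]
    simp [List.getD_eq_getElem?_getD, List.mem_range.mp hj]
  rw [List.filter_congr (q := fun (j : Nat) => !(row.getD j 0 == 0)) ?_]
  · apply List.map_congr_left
    intro j hj
    have hj' := List.mem_of_mem_filter hj
    simp only [Function.comp]
    rw [hget j hj']
  · intro j hj
    simp only [Function.comp]
    rw [hget j hj]
    simp [bne]

theorem pv_cells1_eq (img1 : List (List Int)) (hpre : ∀ r ∈ img1, img1.length ≤ r.length) :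
    ((PySem.List.enumerate img1 0).flatMap (fun ir =>
      ((PySem.List.enumerate (PySem.List.slice ir.2 none (some (PySem.List.len img1))) 0).filter
          (fun jv => jv.2 != 0)).map (fun jv => (ir.1, jv.1, jv.2))))
      = cellsOf img1 img1.length := by
  rw [PySem.List.enumerate_eq_map_pyRange _ ([] : List Int), PySem.List.len_eq,
    PySem.List.pyRange_zero_nat, List.flatMap_map, List.flatMap_map]
  unfold cellsOf
  apply List.flatMap_congr
  intro i hi
  have hi' : i < img1.length := List.mem_range.mp hi
  rw [PySem.List.pyGetD_natCast]
  have hmem : img1.getD i [] ∈ img1 := by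
    rw [List.getD_eq_getElem _ _ hi']
    exact List.getElem_mem hi'
  simp only []
  rw [pv_row_eq img1.length (i : Int) _ (hpre _ hmem)]
  simp [aV]

theorem pv_cells2_eq (img1 img2 : List (List Int)) (h2 : img1.length ≤ img2.length)
    (h3 : ∀ r ∈ img2.take img1.length, img1.length ≤ r.length) :
    ((PySem.List.enumerate (PySem.List.slice img2 none (some (PySem.List.len img1))) 0).flatMap (fun ir =>
      ((PySem.List.enumerate (PySem.List.slice ir.2 none (some (PySem.List.len img1))) 0).filter
          (fun jv => jv.2 != 0)).map (fun jv => (ir.1, jv.1, jv.2))))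
      = cellsOf img2 img1.length := by
  rw [PySem.List.len_eq, PySem.List.slice_to_natCast,
    PySem.List.enumerate_eq_map_pyRange _ ([] : List Int)]
  have hlen : (img2.take img1.length).length = img1.length := by simp [h2]
  rw [PySem.List.len_eq, hlen, PySem.List.pyRange_zero_nat, List.flatMap_map, List.flatMap_map]
  unfold cellsOf
  apply List.flatMap_congr
  intro i hi
  have hi' : i < img1.length := List.mem_range.mp hi
  rw [PySem.List.pyGetD_natCast]
  have hget : (img2.take img1.length).getD i [] = img2.getD i [] := by
    simp [List.getD_eq_getElem?_getD, hi']
  rw [hget]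
  have hmem : img2.getD i [] ∈ img2.take img1.length := by
    rw [← hget, List.getD_eq_getElem _ _ (by omega : i < (img2.take img1.length).length)]
    exact List.getElem_mem _
  simp only []
  rw [pv_row_eq img1.length (i : Int) _ (h3 _ hmem)]
  simp [aV]

-- ---- B-side: the offset dictionary ----

theorem pv_mem_cellsOf {M : List (List Int)} {n : Nat} {c : Int × Int × Int}
    (h : c ∈ cellsOf M n) :
    ∃ i j : Nat, i < n ∧ j < n ∧ c = ((i : Int), (j : Int), aV M i j) := by
  unfold cellsOf at h
  simp only [List.mem_flatMap, List.mem_map, List.mem_filter, List.mem_range] at h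
  obtain ⟨i, hi, j, ⟨hj, _⟩, rfl⟩ := h
  exact ⟨i, j, hi, hj, rfl⟩

theorem pv_inner_row (img2 : List (List Int)) (n i2 : Nat) (hi2 : i2 < n)
    (i1 j1 v1 di dj : Int) :
    ((((List.range n).filter (fun (j : Nat) => !(aV img2 i2 j == 0))).filter
        (fun (j : Nat) => decide ((((i2 : Int)) - i1, ((j : Nat) : Int) - j1) = (di, dj)))).map
          (fun (j : Nat) => v1 * aV img2 i2 j)).sum
      = if (i2 : Int) = i1 + di then v1 * v2e img2 n (i1 + di) (j1 + dj) else 0 := by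
  rw [List.filter_filter]
  by_cases hI : (i2 : Int) = i1 + di
  · rw [if_pos hI]
    have hcong : ∀ j ∈ List.range n,
        (decide ((((i2 : Int)) - i1, ((j : Nat) : Int) - j1) = (di, dj)) &&
          !(aV img2 i2 j == 0))
          = ((fun (j : Nat) => !(aV img2 i2 j == 0)) j && decide (((j : Nat) : Int) = j1 + dj)) := by
      intro j _
      have h1 : ((((i2 : Int)) - i1, ((j : Nat) : Int) - j1) = (di, dj)) ↔
          (((j : Nat) : Int) = j1 + dj) := by
        rw [Prod.mk.injEq]
        constructor
        · rintro ⟨_, h⟩; omega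
        · intro h; exact ⟨by omega, by omega⟩
      rw [Bool.and_comm]
      congr 1
      exact decide_eq_decide.mpr h1
    rw [List.filter_congr hcong, pv_range_delta_filter]
    unfold v2e
    split_ifs with hc hr hr
    · have : (i1 + di).toNat = i2 := by omega
      simp [this]
    · exfalso; exact hr ⟨by omega, by omega, hc.1, hc.2.1⟩
    · simp only [List.map_nil, List.sum_nil]
      have hz : aV img2 i2 (j1 + dj).toNat = 0 := by
        by_contra hz
        exact hc ⟨hr.2.2.1, hr.2.2.2, by simpa using hz⟩
      have : (i1 + di).toNat = i2 := by omega
      rw [this, hz, mul_zero]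
    · simp
  · rw [if_neg hI]
    have hcong : ∀ j ∈ List.range n,
        (decide ((((i2 : Int)) - i1, ((j : Nat) : Int) - j1) = (di, dj)) &&
          !(aV img2 i2 j == 0)) = false := by
      intro j _
      have : ¬ ((((i2 : Int)) - i1, ((j : Nat) : Int) - j1) = (di, dj)) := by
        rw [Prod.mk.injEq]
        rintro ⟨h, _⟩
        exact hI (by omega)
      simp [this]
    rw [List.filter_congr hcong, List.filter_false]
    simp

theorem pv_inner_sum (img2 : List (List Int)) (n : Nat) (i1 j1 v1 di dj : Int) :
    (((cellsOf img2 n).filter (fun c2 => decide ((c2.1 - i1, c2.2.1 - j1) = (di, dj)))).map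
        (fun c2 => v1 * c2.2.2)).sum
      = v1 * v2e img2 n (i1 + di) (j1 + dj) := by
  unfold cellsOf
  rw [List.filter_flatMap]
  simp only [List.filter_map, List.map_flatMap, List.map_map]
  rw [pv_sum_flatMap]
  have hpt : ∀ i2 ∈ List.range n,
      ((((List.range n).filter (fun (j : Nat) => !(aV img2 i2 j == 0))).filter
          ((fun c2 => decide ((c2.1 - i1, c2.2.1 - j1) = (di, dj))) ∘
            (fun (j : Nat) => ((i2 : Int), (j : Int), aV img2 i2 j)))).map
            ((fun c2 => v1 * c2.2.2) ∘ (fun (j : Nat) => ((i2 : Int), (j : Int), aV img2 i2 j)))).sum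
        = if (i2 : Int) = i1 + di then v1 * v2e img2 n (i1 + di) (j1 + dj) else 0 := by
    intro i2 hi2
    rw [← pv_inner_row img2 n i2 (List.mem_range.mp hi2) i1 j1 v1 di dj]
    rfl
  rw [List.map_congr_left hpt, pv_range_delta_sum]
  by_cases hr : 0 ≤ i1 + di ∧ i1 + di < (n : Int)
  · rw [if_pos hr]
  · rw [if_neg hr]
    unfold v2e
    rw [if_neg (by omega)]
    rw [mul_zero]

theorem pv_pairSum (img1 img2 : List (List Int)) (n : Nat) (di dj : Int) :
    (((pairsOf img1 img2 n).filter (fun p => decide (keyOf p = (di, dj)))).map wOf).sum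
      = Sm img1 img2 n di dj := by
  unfold pairsOf keyOf wOf
  rw [List.filter_flatMap]
  simp only [List.filter_map, List.map_flatMap, List.map_map]
  rw [pv_sum_flatMap]
  have hpt : ∀ c1 ∈ cellsOf img1 n,
      (((cellsOf img2 n).filter
          ((fun p => decide ((p.2.1 - p.1.1, p.2.2.1 - p.1.2.1) = (di, dj))) ∘ (fun c2 => (c1, c2)))).map
          ((fun p => p.1.2.2 * p.2.2.2) ∘ (fun c2 => (c1, c2)))).sum
        = c1.2.2 * v2e img2 n (c1.1 + di) (c1.2.1 + dj) := by
    intro c1 _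
    rw [← pv_inner_sum img2 n c1.1 c1.2.1 c1.2.2 di dj]
    rfl
  rw [List.map_congr_left hpt]
  unfold cellsOf
  rw [List.map_flatMap, pv_sum_flatMap]
  unfold Sm
  apply congrArg
  apply List.map_congr_left
  intro i1 _
  rw [List.map_map]
  rw [show ((fun (c1 : Int × Int × Int) => c1.2.2 * v2e img2 n (c1.1 + di) (c1.2.1 + dj)) ∘
      (fun (j : Nat) => ((i1 : Int), (j : Int), aV img1 i1 j)))
    = (fun (j : Nat) => aV img1 i1 j * v2e img2 n ((i1 : Int) + di) (((j : Nat) : Int) + dj)) from rfl]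
  rw [pv_sum_filter_zero _ _ _ (by
    intro j _ hj
    have : aV img1 i1 j = 0 := by simpa using hj
    rw [this, zero_mul])]
  apply congrArg
  apply List.map_congr_left
  intro j _
  rw [mul_comm]

theorem pv_f_eq (img1 img2 : List (List Int)) (hn : 0 < img1.length) :
    f img1 img2 =
      ((List.range (2*img1.length-1)).flatMap (fun (io : Nat) =>
        (List.range (2*img1.length-1)).map (fun (jo : Nat) =>
          Sm img1 img2 img1.length ((io : Int) - ((img1.length : Int) - 1))
            ((jo : Int) - ((img1.length : Int) - 1))))).foldl max 0 := by
  unfold f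
  simp only [PySem.List.len_eq]
  set n := img1.length with hn'
  have c3 : 3 * (n : Int) - 2 = ((3*n-2 : Nat) : Int) := by omega
  have c2 : 2 * (n : Int) - 1 = ((2*n-1 : Nat) : Int) := by omega
  have cN : ∀ (k : Nat), (k : Int) + ((n : Int) - 1) = ((k + (n-1) : Nat) : Int) := by
    intro k; push_cast; omega
  rw [c3, c2]
  simp only [PySem.List.pyRange_zero_nat, List.map_map, List.foldl_map, cN,
    PySem.List.pySetD_natCast, PySem.List.pyGetD_natCast, pv_aV_def]
  simp only [Function.comp_def]
  rw [pv_padfold img1 img2 n (3*n-2) hn (by omega) n le_rfl (fun _ _ => 0)]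
  simp only [List.flatMap_map, ← Nat.cast_add,
    PySem.List.pyGetD_natCast, pv_aV_def]
  rw [List.foldl_flatMap]
  simp only [List.foldl_map]
  apply PySem.List.foldl_congr_mem
  intro acc io hio
  apply PySem.List.foldl_congr_mem
  intro acc2 jo hjo
  apply congrArg
  exact pv_sumexpr img1 img2 n (3*n-2) hn rfl io jo (List.mem_range.mp hio) (List.mem_range.mp hjo)

theorem pv_falt_eq (img1 img2 : List (List Int)) (hpre : Pre_f img1 img2) :
    f_alt img1 img2 =
      ((PySem.Set.ofList ((pairsOf img1 img2 img1.length).map keyOf)).map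
        (fun k => Sm img1 img2 img1.length k.1 k.2)).foldl max 0 := by
  unfold f_alt
  simp only []
  rw [pv_cells1_eq img1 hpre.1, pv_cells2_eq img1 img2 hpre.2.1 hpre.2.2]
  have hd : (cellsOf img1 img1.length).foldl (fun acc c1 =>
        (cellsOf img2 img1.length).foldl (fun acc c2 =>
          PySem.Dict.insert acc (c2.1 - c1.1, c2.2.1 - c1.2.1)
            (PySem.Dict.getD acc (c2.1 - c1.1, c2.2.1 - c1.2.1) 0 + c1.2.2 * c2.2.2)) acc)
        PySem.Dict.empty
      = (pairsOf img1 img2 img1.length).foldl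
          (fun d p => d.insert (keyOf p) (d.getD (keyOf p) 0 + wOf p)) PySem.Dict.empty := by
    unfold pairsOf
    rw [List.foldl_flatMap]
    simp only [List.foldl_map, keyOf, wOf]
  rw [hd]
  have hnd : ((pairsOf img1 img2 img1.length).foldl
      (fun d p => d.insert (keyOf p) (d.getD (keyOf p) 0 + wOf p)) PySem.Dict.empty).keys.Nodup :=
    PySem.Dict.nodup_keys_foldl_insert_key _ keyOf _ _ (by simp [PySem.Dict.empty])
  rw [PySem.Dict.values_eq_map_keys _ hnd 0, PySem.Dict.keys_foldl_insert_key]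
  have hupd : PySem.Set.update (PySem.Dict.empty (κ := Int × Int) (ν := Int)).keys
      ((pairsOf img1 img2 img1.length).map keyOf)
      = PySem.Set.ofList ((pairsOf img1 img2 img1.length).map keyOf) := by
    rw [PySem.Set.ofList_eq_foldl]
    rfl
  rw [hupd]
  have hmem : ∀ k ∈ PySem.Set.ofList ((pairsOf img1 img2 img1.length).map keyOf),
      ((pairsOf img1 img2 img1.length).foldl
        (fun d p => d.insert (keyOf p) (d.getD (keyOf p) 0 + wOf p)) PySem.Dict.empty).getD k 0
      = Sm img1 img2 img1.length k.1 k.2 := by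
    intro k _
    rw [pv_getD_weighted]
    have h0 : (PySem.Dict.empty (κ := Int × Int) (ν := Int)).getD k 0 = 0 := rfl
    rw [h0, zero_add]
    have := pv_pairSum img1 img2 img1.length k.1 k.2
    simpa using this
  exact congrArg _ (List.map_congr_left hmem)

-- ===== VERDICT (by name: the statement is the Claim_ definition above) =====
theorem f_spec : Claim_equal_f := by
  intro img1 img2 _ hpre
  unfold Spec_f
  by_cases hn0 : img1.length = 0
  · have h1 : img1 = [] := List.length_eq_zero_iff.mp hn0
    subst h1
    have hA : f [] img2 = 0 := by
      unfold f
      simp [PySem.List.pyRange_one_eq_nil (by norm_num : (-1 : Int) ≤ 0)]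
    have hB : f_alt [] img2 = 0 := by
      unfold f_alt
      simp [PySem.List.enumerate_nil]
      rfl
    rw [hA, hB]
  · have hn : 0 < img1.length := Nat.pos_of_ne_zero hn0
    rw [pv_f_eq img1 img2 hn, pv_falt_eq img1 img2 hpre]
    set n := img1.length with hndef
    apply le_antisymm
    · rcases PySem.List.foldl_max_mem ((List.range (2*n-1)).flatMap (fun (io : Nat) =>
        (List.range (2*n-1)).map (fun (jo : Nat) =>
          Sm img1 img2 n ((io : Int) - ((n : Int) - 1)) ((jo : Int) - ((n : Int) - 1))))) 0 with h0 | hm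
      · rw [h0]
        exact (PySem.List.le_foldl_max _ 0).1
      · simp only [List.mem_flatMap, List.mem_map, List.mem_range] at hm
        obtain ⟨io, hio, jo, hjo, hval⟩ := hm
        by_cases hk : ((io : Int) - ((n : Int) - 1), (jo : Int) - ((n : Int) - 1))
            ∈ PySem.Set.ofList ((pairsOf img1 img2 n).map keyOf)
        · have hin := List.mem_map_of_mem (f := fun k : Int × Int => Sm img1 img2 n k.1 k.2) hk
          rw [← hval]
          exact (PySem.List.le_foldl_max _ 0).2 _ hin
        · have hni : ((io : Int) - ((n : Int) - 1), (jo : Int) - ((n : Int) - 1))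
              ∉ (pairsOf img1 img2 n).map keyOf :=
            fun h => hk ((PySem.Set.mem_ofList _ _).mpr h)
          have hfil : (pairsOf img1 img2 n).filter
              (fun p => decide (keyOf p = ((io : Int) - ((n : Int) - 1), (jo : Int) - ((n : Int) - 1)))) = [] := by
            apply List.filter_eq_nil_iff.mpr
            intro p hp
            simp only [decide_eq_true_eq]
            intro he
            exact hni (he ▸ List.mem_map_of_mem hp)
          have hS : Sm img1 img2 n ((io : Int) - ((n : Int) - 1)) ((jo : Int) - ((n : Int) - 1)) = 0 := by
            rw [← pv_pairSum img1 img2 n, hfil]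
            simp
          rw [← hval, hS]
          exact (PySem.List.le_foldl_max _ 0).1
    · rcases PySem.List.foldl_max_mem ((PySem.Set.ofList ((pairsOf img1 img2 n).map keyOf)).map
          (fun k => Sm img1 img2 n k.1 k.2)) 0 with h0 | hm
      · rw [h0]
        exact (PySem.List.le_foldl_max _ 0).1
      · simp only [List.mem_map] at hm
        obtain ⟨k, hk, hval⟩ := hm
        have hk' : k ∈ (pairsOf img1 img2 n).map keyOf := (PySem.Set.mem_ofList _ _).mp hk
        simp only [List.mem_map] at hk'
        obtain ⟨p, hp, hkey⟩ := hk'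
        unfold pairsOf at hp
        simp only [List.mem_flatMap, List.mem_map] at hp
        obtain ⟨c1, hc1, c2, hc2, rfl⟩ := hp
        obtain ⟨i1, j1, hi1, hj1, rfl⟩ := pv_mem_cellsOf hc1
        obtain ⟨i2, j2, hi2, hj2, rfl⟩ := pv_mem_cellsOf hc2
        unfold keyOf at hkey
        simp only [] at hkey
        have hb1 : -((n : Int) - 1) ≤ k.1 ∧ k.1 ≤ (n : Int) - 1 := by
          rw [← hkey]; constructor <;> (simp only []; omega)
        have hb2 : -((n : Int) - 1) ≤ k.2 ∧ k.2 ≤ (n : Int) - 1 := by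
          rw [← hkey]; constructor <;> (simp only []; omega)
        have hin : Sm img1 img2 n k.1 k.2 ∈ ((List.range (2*n-1)).flatMap (fun (io : Nat) =>
            (List.range (2*n-1)).map (fun (jo : Nat) =>
              Sm img1 img2 n ((io : Int) - ((n : Int) - 1)) ((jo : Int) - ((n : Int) - 1))))) := by
          simp only [List.mem_flatMap, List.mem_map, List.mem_range]
          refine ⟨(k.1 + (n : Int) - 1).toNat, by omega, (k.2 + (n : Int) - 1).toNat, by omega, ?_⟩
          congr 1 <;> omega
        rw [← hval]
        exact (PySem.List.le_foldl_max _ 0).2 _ hin
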